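-- pv_equiv track=rewrite | github.com/DeepWok/mase | machop/mase_components/fixed_arithmetic/test/fixed_range_augmentation_tb.py | range_reduction_sw
-- ===== SOURCE A (Python) =====
-- def range_reduction_sw(x: int, width: int) -> int:
--     """model of range reduction for isqrt"""
--     # Find MSB
--     # NOTE: if the input is 0 then consider msb index as width-1.
--     msb_index = width-1
--     for i in range(1, width+1):
--         power = 2 ** (width - i)
--         if power <= x:
--             msb_index = width - i
--             break
--     res = x
--     if msb_index < (width - 1):
--         res = res * 2 ** (width - 1 - msb_index)
--
--     return res, msb_index
-- ===== SOURCE B (Python) =====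
-- def range_reduction_sw(x: int, width: int) -> int:
--     """model of range reduction for isqrt (left-shift normalization)"""
--     res = x
--     shift = 0
--     while res > 0 and res < 2 ** (width - 1):
--         res <<= 1
--         shift += 1
--     return res, width - 1 - shift
-- ===== Notes on version B (the rewrite author's own statement) =====
-- stated objective: alternative
-- what changed: B normalizes by repeatedly left-shifting the value itself while counting shifts and derives the MSB index at the end, instead of scanning descending powers of two to locate the MSB first and then multiplying.
import Mathlib
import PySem

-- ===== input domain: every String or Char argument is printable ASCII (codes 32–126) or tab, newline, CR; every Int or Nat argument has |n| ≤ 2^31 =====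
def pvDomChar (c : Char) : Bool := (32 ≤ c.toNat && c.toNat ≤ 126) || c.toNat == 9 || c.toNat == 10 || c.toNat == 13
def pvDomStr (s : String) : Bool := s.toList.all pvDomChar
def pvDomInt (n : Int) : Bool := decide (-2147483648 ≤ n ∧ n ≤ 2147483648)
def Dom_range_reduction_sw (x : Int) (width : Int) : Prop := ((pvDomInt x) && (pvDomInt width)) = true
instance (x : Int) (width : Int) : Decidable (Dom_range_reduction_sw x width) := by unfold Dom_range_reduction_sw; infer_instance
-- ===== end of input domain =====

-- B replaces A's descending power-of-two scan by left-shift normalization of the value itself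
-- with a shift counter (objective: alternative). Return value is [res, msb_index] for the tuple.

-- ===== PORT A =====
-- loop 'for i in range(1, width+1): power = 2**(width-i); if power <= x: msb = width-i; break'
-- exponent width-i is ≥ 0 for every i in the range, so the .toNat is exact.
def rrScan (x width : Int) : List Int → Int
  | [] => width - 1
  | i :: rest => if (2:Int) ^ ((width - i).toNat) ≤ x then width - i else rrScan x width rest

def range_reduction_sw (x : Int) (width : Int) : List Int :=
  let msb := rrScan x width (PySem.List.pyRange 1 (width+1) 1)
  let res := if msb < width - 1 then x * (2:Int) ^ ((width - 1 - msb).toNat) else x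
  [res, msb]

-- ===== PORT B =====
-- 'while res > 0 and res < 2**(width-1): res <<= 1; shift += 1'.
-- For width ≤ 0 Python's bound 2**(width-1) is a float in (0,1]; an int res > 0 is then never
-- below it, exactly as with the Lean bound 2^(width-1).toNat = 1, so the .toNat bound is exact.
def rrNorm (bound : Int) (res shift : Int) : Int × Int :=
  if h : 0 < res ∧ res < bound then rrNorm bound (res * 2) (shift + 1) else (res, shift)
termination_by (bound - res).toNat
decreasing_by omega

def range_reduction_sw_alt (x : Int) (width : Int) : List Int :=
  let p := rrNorm ((2:Int) ^ ((width - 1).toNat)) x 0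
  [p.1, width - 1 - p.2]

-- ===== PRECONDITION & SPEC =====
def Spec_range_reduction_sw (x : Int) (width : Int) (out : List Int) : Prop := out = range_reduction_sw_alt x width
instance (x : Int) (width : Int) (out : List Int) : Decidable (Spec_range_reduction_sw x width out) := by unfold Spec_range_reduction_sw; infer_instance

-- ===== CLAIM (what is proved, stated in full; the proofs are below) =====
def Claim_equal_range_reduction_sw : Prop := ∀ (x : Int) (width : Int), Dom_range_reduction_sw x width → Spec_range_reduction_sw x width (range_reduction_sw x width)

-- ===== LEMMAS AND PROOFS =====

-- A's scan never fires on a nonpositive x: every power 2^k is ≥ 1 > x.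
lemma rrScan_nonpos (x width : Int) (hx : x ≤ 0) : ∀ l, rrScan x width l = width - 1 := by
  intro l
  induction l with
  | nil => rfl
  | cons i rest ih =>
      have hp : ¬ (2:Int) ^ ((width - i).toNat) ≤ x := by
        have h1 : (1:Int) ≤ 2 ^ ((width - i).toNat) := one_le_pow₀ (by norm_num)
        omega
      simp [rrScan, hp, ih]

lemma rrNorm_stop (bound res shift : Int) (h : ¬ (0 < res ∧ res < bound)) :
    rrNorm bound res shift = (res, shift) := by
  rw [rrNorm]; simp [h]

lemma rrNorm_step (bound res shift : Int) (h : 0 < res ∧ res < bound) :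
    rrNorm bound res shift = rrNorm bound (res * 2) (shift + 1) := by
  rw [rrNorm]; simp [h]

-- Bridge: with x ≥ 1, B's loop from state (x·2^shift, shift) and A's scan over the remaining
-- range [shift+1 … width] describe the same normalization.
lemma bridge (x n : Int) (hx : 1 ≤ x) :
    ∀ k : Nat, ∀ shift : Int, 0 ≤ shift → shift ≤ n - 1 → k = (n - 1 - shift).toNat →
      rrScan x n (PySem.List.pyRange (shift+1) (n+1) 1) ≤ n - 1 ∧
      rrNorm ((2:Int) ^ ((n-1).toNat)) (x * 2 ^ (shift.toNat)) shift =
        (x * 2 ^ ((n - 1 - rrScan x n (PySem.List.pyRange (shift+1) (n+1) 1)).toNat),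
         n - 1 - rrScan x n (PySem.List.pyRange (shift+1) (n+1) 1)) := by
  intro k
  induction k with
  | zero =>
      intro shift h0 h1 hk
      have hsh : shift = n - 1 := by omega
      subst hsh
      have hcons : PySem.List.pyRange (n - 1 + 1) (n+1) 1 = (n - 1 + 1) :: PySem.List.pyRange (n - 1 + 1 + 1) (n+1) 1 :=
        PySem.List.pyRange_one_cons (by omega)
      have hexp : (n - (n - 1 + 1)).toNat = 0 := by omega
      have htest : (2:Int) ^ ((n - (n - 1 + 1)).toNat) ≤ x := by rw [hexp]; simpa using hx
      have hm : rrScan x n (PySem.List.pyRange (n - 1 + 1) (n+1) 1) = n - (n - 1 + 1) := by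
        rw [hcons]; simp only [rrScan, if_pos htest]
      have hm' : n - 1 - (n - (n - 1 + 1)) = n - 1 := by omega
      rw [hm, hm']
      refine ⟨by omega, ?_⟩
      have hstop : ¬ (0 < x * 2 ^ ((n-1).toNat) ∧ x * 2 ^ ((n-1).toNat) < (2:Int) ^ ((n-1).toNat)) := by
        intro ⟨_, hlt⟩
        have h2 : (1:Int) * 2 ^ ((n-1).toNat) ≤ x * 2 ^ ((n-1).toNat) :=
          mul_le_mul_of_nonneg_right hx (by positivity)
        rw [one_mul] at h2; omega
      rw [rrNorm_stop _ _ _ hstop]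
  | succ k ih =>
      intro shift h0 h1 hk
      have hcons : PySem.List.pyRange (shift+1) (n+1) 1 = (shift+1) :: PySem.List.pyRange (shift+2) (n+1) 1 := by
        have := PySem.List.pyRange_one_cons (a := shift+1) (b := n+1) (by omega)
        simpa [add_assoc] using this
      have hexp : (n - (shift+1)).toNat + shift.toNat = (n-1).toNat := by omega
      by_cases htest : (2:Int) ^ ((n - (shift+1)).toNat) ≤ x
      · -- A breaks here; B's loop stops: x·2^shift ≥ 2^(n-1)
        have hm : rrScan x n (PySem.List.pyRange (shift+1) (n+1) 1) = n - (shift+1) := by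
          rw [hcons]; simp only [rrScan, if_pos htest]
        rw [hm]
        refine ⟨by omega, ?_⟩
        have hge : (2:Int) ^ ((n-1).toNat) ≤ x * 2 ^ (shift.toNat) := by
          calc (2:Int) ^ ((n-1).toNat) = 2 ^ ((n - (shift+1)).toNat) * 2 ^ (shift.toNat) := by
                rw [← pow_add, hexp]
            _ ≤ x * 2 ^ (shift.toNat) := mul_le_mul_of_nonneg_right htest (by positivity)
        rw [rrNorm_stop _ _ _ (by omega)]
        have : n - 1 - (n - (shift+1)) = shift := by omega
        rw [this]
      · -- A moves on; B doubles: x·2^shift < 2^(n-1)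
        have hm : rrScan x n (PySem.List.pyRange (shift+1) (n+1) 1) =
            rrScan x n (PySem.List.pyRange (shift+2) (n+1) 1) := by
          rw [hcons]; simp only [rrScan, if_neg htest]
        have hnotend : shift + 1 ≤ n - 1 := by
          by_contra hend
          have hsh : shift = n - 1 := by omega
          exact htest (by rw [hsh]; simpa [show (n - (n - 1 + 1)).toNat = 0 by omega] using hx)
        have hlt : x * 2 ^ (shift.toNat) < (2:Int) ^ ((n-1).toNat) := by
          calc x * 2 ^ (shift.toNat) < 2 ^ ((n - (shift+1)).toNat) * 2 ^ (shift.toNat) :=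
                mul_lt_mul_of_pos_right (by omega) (by positivity)
            _ = 2 ^ ((n-1).toNat) := by rw [← pow_add, hexp]
        have hpos : 0 < x * 2 ^ (shift.toNat) := by positivity
        have hstep := rrNorm_step ((2:Int) ^ ((n-1).toNat)) (x * 2 ^ (shift.toNat)) shift ⟨hpos, hlt⟩
        have hdouble : x * 2 ^ (shift.toNat) * 2 = x * 2 ^ ((shift+1).toNat) := by
          have : (shift+1).toNat = shift.toNat + 1 := by omega
          rw [this, pow_succ]; ring
        have ihr := ih (shift+1) (by omega) hnotend (by omega)
        rw [hm, hstep, hdouble]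
        have h22 : shift + 1 + 1 = shift + 2 := by omega
        rw [h22] at ihr
        exact ihr

-- ===== VERDICT (by name: the statement is the Claim_ definition above) =====
theorem range_reduction_sw_spec : Claim_equal_range_reduction_sw := by
  intro x width _
  unfold Spec_range_reduction_sw range_reduction_sw range_reduction_sw_alt
  by_cases hx : x ≤ 0
  · -- nonpositive x: scan never fires, B's loop never runs
    rw [rrScan_nonpos x width hx, rrNorm_stop _ _ _ (by omega)]
    simp
  · by_cases hw : width ≤ 0
    · -- empty range; bound is 2^0 = 1 ≤ x
      rw [PySem.List.pyRange_one_eq_nil (by omega)]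
      have hb : ((width - 1).toNat) = 0 := by omega
      rw [hb, rrNorm_stop _ _ _ (by omega)]
      simp [rrScan]
    · obtain ⟨hle, heq⟩ := bridge x width (by omega) ((width - 1 - 0).toNat) 0 (by omega) (by omega) rfl
      have h1 : x * (2:Int) ^ ((0:Int).toNat) = x := by norm_num
      rw [h1, show (0:Int)+1 = 1 by ring] at heq
      set m := rrScan x width (PySem.List.pyRange 1 (width+1) 1) with hm
      rw [heq]
      simp only
      have h2 : width - 1 - (width - 1 - m) = m := by omega
      rw [h2]
      by_cases hcase : m < width - 1
      · rw [if_pos hcase]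
      · rw [if_neg hcase]
        have h3 : (width - 1 - m).toNat = 0 := by omega
        rw [h3]; norm_num
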